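-- pv_equiv track=rewrite | github.com/Jo-dv/Algorithm_Study | Python/프로그래머스/Lv 1/과일 장수.py | solution
-- ===== SOURCE A (Python) =====
-- from collections import deque
--
-- def solution(k, m, score):
--     boxes, box, maximum = [], [], len(score) // m  # 최대로 생성할 수 있는 상자의 수
--     score = deque(sorted(score, reverse=True))  # 최상품부터 박스 생성
--
--     while len(boxes) != maximum:  # 상자를 최대로 만들어 낼 때까지
--         box.append(score.popleft())  # 사과 상자에서 사과를 뽑아 박스에 저장
--         if len(box) == m:  # 한 박스의 적재용량에 도달하였을 경우
--             boxes.append(box)  # 해당 박스 저장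
--             box = []
--
--     answer = sum([min(i)*m for i in boxes])  # 각 박스 기준 최하품의 점수와 적재용량을 곱하여 합함
--     return answer
-- ===== SOURCE B (Python) =====
-- def solution(k, m, score):
--     s = sorted(score, reverse=True)
--     return m * sum(s[i * m - 1] for i in range(1, len(s) // m + 1))
-- ===== Notes on version B (the rewrite author's own statement) =====
-- stated objective: simpler
-- what changed: Instead of popping a deque one element at a time into explicit boxes and taking min() of each box, B sorts descending once and directly indexes every m-th element (the minimum of each box is its last element), summing them in one comprehension.
import Mathlib
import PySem

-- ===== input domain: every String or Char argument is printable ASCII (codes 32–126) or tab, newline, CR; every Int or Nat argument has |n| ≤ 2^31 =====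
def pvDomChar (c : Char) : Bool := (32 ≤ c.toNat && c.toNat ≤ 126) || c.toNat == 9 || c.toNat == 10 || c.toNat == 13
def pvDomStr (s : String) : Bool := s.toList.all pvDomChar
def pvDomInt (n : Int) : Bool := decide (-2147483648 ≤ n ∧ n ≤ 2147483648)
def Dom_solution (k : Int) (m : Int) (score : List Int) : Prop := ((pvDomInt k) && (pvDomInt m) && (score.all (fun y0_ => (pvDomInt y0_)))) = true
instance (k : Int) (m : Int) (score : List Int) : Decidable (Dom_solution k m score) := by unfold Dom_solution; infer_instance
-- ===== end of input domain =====

-- B replaces A's deque/box-building loop by directly indexing every m-th element of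
-- the descending-sorted list (objective: simpler).

-- ===== PORT A =====
-- the while loop: pops the front of the deque into `box`; a full box is appended to `boxes`.
-- On the `[]` branch Python raises IndexError (excluded by Pre_solution); the port returns the boxes so far.
def solutionLoop (m maximum : Int) : List Int → List Int → List (List Int) → List (List Int)
  | dq, box, boxes =>
    if (boxes.length : Int) = maximum then boxes
    else
      match dq with
      | [] => boxes
      | x :: rest =>
        let box' := box ++ [x]
        if (box'.length : Int) = m then solutionLoop m maximum rest [] (boxes ++ [box'])
        else solutionLoop m maximum rest box' boxes

def solution (k : Int) (m : Int) (score : List Int) : Int :=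
  let maximum := PySem.Int.floordiv (score.length : Int) m
  let dq := PySem.List.sorted score (fun x => x) true
  let boxes := solutionLoop m maximum dq [] []
  -- min(i) raises on an empty box, which never occurs under Pre_solution; .getD 0 is that dead branch
  (boxes.map (fun i => (PySem.List.min? i (fun x => x)).getD 0 * m)).sum

-- ===== PORT B =====
def solution_alt (k : Int) (m : Int) (score : List Int) : Int :=
  let s := PySem.List.sorted score (fun x => x) true
  m * ((PySem.List.pyRange 1 (PySem.Int.floordiv (s.length : Int) m + 1) 1).map
        (fun i => (PySem.List.pyGet? s (i * m - 1)).getD 0)).sum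

-- ===== PRECONDITION & SPEC =====
-- Pre_ excludes m = 0 (A raises ZeroDivisionError) and m < 0 with a nonempty list
-- (A's while loop pops the deque dry and raises IndexError); m < 0 with an empty
-- list is kept: there A returns 0 normally.
def Pre_solution (k : Int) (m : Int) (score : List Int) : Prop :=
  1 ≤ m ∨ (score = [] ∧ m < 0)
instance (k : Int) (m : Int) (score : List Int) : Decidable (Pre_solution k m score) := by
  unfold Pre_solution; infer_instance

def pvWitness_solution : Int × Int × List Int := (4, 3, [1, 2, 3, 1, 2, 3, 1])

def Spec_solution (k : Int) (m : Int) (score : List Int) (out : Int) : Prop := out = solution_alt k m score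
instance (k : Int) (m : Int) (score : List Int) (out : Int) : Decidable (Spec_solution k m score out) := by unfold Spec_solution; infer_instance

-- ===== CLAIM (what is proved, stated in full; the proofs are below) =====
def Claim_equal_solution : Prop := ∀ (k : Int) (m : Int) (score : List Int), Dom_solution k m score → Pre_solution k m score → Spec_solution k m score (solution k m score)

-- ===== LEMMAS AND PROOFS =====

-- the first q blocks of m elements of a list
def chunksRec : Nat → Nat → List Int → List (List Int)
  | 0, _, _ => []
  | q+1, mn, d => d.take mn :: chunksRec q mn (d.drop mn)

-- running the loop until the current box fills up
theorem fillBox (j : Nat) : ∀ (m maximum : Int) (dq box : List Int) (boxes : List (List Int)),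
    1 ≤ j → ((box.length : Int) + j = m) → j ≤ dq.length → ((boxes.length : Int) ≠ maximum) →
    solutionLoop m maximum dq box boxes
      = solutionLoop m maximum (dq.drop j) [] (boxes ++ [box ++ dq.take j]) := by
  induction j with
  | zero => intro _ _ _ _ _ h; omega
  | succ j ih =>
    intro m maximum dq box boxes _ hm hlen hne
    match dq with
    | [] => simp at hlen
    | x :: rest =>
      rw [solutionLoop]
      simp only [if_neg hne]
      by_cases hj : j = 0
      · subst hj
        have : ((box ++ [x]).length : Int) = m := by
          simp only [List.length_append, List.length_cons, List.length_nil]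
          push_cast at hm ⊢; omega
        simp only [if_pos this]
        simp
      · have hne' : ((box ++ [x]).length : Int) ≠ m := by
          simp only [List.length_append, List.length_cons, List.length_nil]
          push_cast at hm ⊢; omega
        simp only [if_neg hne']
        rw [ih m maximum rest (box ++ [x]) boxes (by omega)
              (by simp only [List.length_append, List.length_cons, List.length_nil]
                  push_cast at hm ⊢; omega)
              (by simp at hlen; omega) hne]
        simp

theorem loopA_chunks (q : Nat) : ∀ (m maximum : Int) (dq : List Int) (boxes : List (List Int)),
    1 ≤ m → maximum = (boxes.length : Int) + q → m.toNat * q ≤ dq.length →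
    solutionLoop m maximum dq [] boxes = boxes ++ chunksRec q m.toNat dq := by
  induction q with
  | zero =>
    intro m maximum dq boxes _ hmax _
    rw [solutionLoop.eq_def]
    simp only [if_pos (by omega : (boxes.length : Int) = maximum)]
    simp [chunksRec]
  | succ q ih =>
    intro m maximum dq boxes hm hmax hlen
    have hmn : 1 ≤ m.toNat := by omega
    have hlen' : m.toNat * (q + 1) = m.toNat * q + m.toNat := by ring
    rw [fillBox m.toNat m maximum dq [] boxes hmn (by simp; omega) (by omega) (by omega)]
    rw [ih m maximum (dq.drop m.toNat) (boxes ++ [[] ++ dq.take m.toNat])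
          hm (by simp; push_cast; omega) (by simp; omega)]
    simp [chunksRec]

-- in a nonincreasing list, min of the first mn elements is the element at index mn-1
theorem min_take (d : List Int) (mn : Nat) (hmn : 0 < mn) (hlen : mn ≤ d.length)
    (hsorted : d.Pairwise (fun a b => b ≤ a)) :
    (PySem.List.min? (d.take mn) (fun x => x)).getD 0 = d.getD (mn - 1) 0 := by
  set t := d.take mn with ht
  have htlen : t.length = mn := by simp [ht]; omega
  have htne : t ≠ [] := by intro h; rw [h] at htlen; simp at htlen; omega
  obtain ⟨v, hv⟩ : ∃ v, PySem.List.min? t (fun x => x) = some v := by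
    cases h : PySem.List.min? t (fun x => x) with
    | none => exact absurd ((PySem.List.min?_eq_none_iff _ _).mp h) htne
    | some v => exact ⟨v, rfl⟩
  have hvmem : v ∈ t := PySem.List.min?_mem hv
  have hvmin : ∀ y ∈ t, v ≤ y := PySem.List.min?_isMin hv
  have htp : t.Pairwise (fun a b => b ≤ a) := hsorted.sublist (List.take_sublist mn d)
  have hlast : mn - 1 < t.length := by omega
  have hle : t[mn - 1]'hlast ≤ v := by
    obtain ⟨i, hi, hiv⟩ := List.mem_iff_getElem.mp hvmem
    rcases Nat.lt_or_ge i (mn - 1) with h | h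
    · have := (List.pairwise_iff_getElem.mp htp) i (mn - 1) hi hlast h
      omega
    · have hieq : i = mn - 1 := by omega
      subst hieq; omega
  have hge : v ≤ t[mn - 1]'hlast := hvmin _ (List.getElem_mem hlast)
  have hveq : v = t[mn - 1]'hlast := le_antisymm hge hle
  have htd : t[mn - 1]'hlast = d[mn - 1]'(by omega) := by
    simp [ht, List.getElem_take]
  rw [hv, Option.getD_some, hveq, htd, List.getD_eq_getElem d 0 (by omega)]

-- the list of box minima is the list of every mn-th element
theorem chunks_min_eq (q : Nat) : ∀ (d : List Int) (mn : Nat), 0 < mn → q * mn ≤ d.length →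
    d.Pairwise (fun a b => b ≤ a) →
    (chunksRec q mn d).map (fun c => (PySem.List.min? c (fun x => x)).getD 0)
      = (List.range q).map (fun k => d.getD ((k + 1) * mn - 1) 0) := by
  induction q with
  | zero => intro d mn _ _ _; simp [chunksRec]
  | succ q ih =>
    intro d mn hmn hlen hs
    have hq : (q + 1) * mn = q * mn + mn := by ring
    rw [List.range_succ_eq_map]
    simp only [chunksRec, List.map_cons, List.map_map]
    congr 1
    · rw [min_take d mn hmn (by omega) hs]; simp
    · rw [ih (d.drop mn) mn hmn (by simp; omega) (hs.sublist (List.drop_sublist mn d))]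
      apply List.map_congr_left
      intro k hk
      simp only [Function.comp_apply]
      have h1 : 1 ≤ (k + 1) * mn := Nat.one_le_iff_ne_zero.mpr (by positivity)
      have h2 : mn + ((k + 1) * mn - 1) = (k + 1 + 1) * mn - 1 := by
        have h3 : (k + 1 + 1) * mn = mn + (k + 1) * mn := by ring
        omega
      rw [List.getD_eq_getElem?_getD, List.getD_eq_getElem?_getD, List.getElem?_drop, h2]

-- (Σ x*m) = (Σ x) * m over a map
theorem sum_map_mul_right {α : Type} (l : List α) (f : α → Int) (m : Int) :
    (l.map (fun c => f c * m)).sum = (l.map f).sum * m := by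
  induction l with
  | nil => simp
  | cons x t ih => simp [ih]; ring

-- ===== VERDICT (by name: the statement is the Claim_ definition above) =====
theorem solution_spec : Claim_equal_solution := by
  intro k m score _ hpre
  unfold Spec_solution
  simp only [solution, solution_alt]
  rcases hpre with hm | ⟨hnil, hneg⟩
  · -- main case 1 ≤ m
    set d := PySem.List.sorted score (fun x => x) true with hd
    have hdlen : d.length = score.length := PySem.List.length_sorted ..
    set mn := m.toNat with hmn
    have hmcast : (mn : Int) = m := by omega
    set q := d.length / mn with hq
    have hfd' : PySem.Int.floordiv (d.length : Int) m = (q : Int) := by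
      rw [PySem.Int.floordiv_eq_ediv_of_pos (by omega), ← hmcast, hq, Int.natCast_div]
    have hfd : PySem.Int.floordiv (score.length : Int) m = (q : Int) := by
      rw [← hdlen]; exact hfd'
    have hqmn : q * mn ≤ d.length := Nat.div_mul_le_self _ _
    have hsorted : d.Pairwise (fun a b => b ≤ a) := PySem.List.sorted_pairwise_rev ..
    clear_value d mn q
    -- A side
    rw [hfd, loopA_chunks q m (q : Int) d [] hm (by simp) (by rw [Nat.mul_comm, ← hmn]; exact hqmn)]
    rw [← hmn, List.nil_append, sum_map_mul_right,
        chunks_min_eq q d mn (by omega) hqmn hsorted]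
    -- B side
    rw [hfd', PySem.List.pyRange_one]
    have hqtn : ((q : Int) + 1 - 1).toNat = q := by simp
    rw [hqtn, List.map_map]
    rw [mul_comm]
    congr 2
    apply List.map_congr_left
    intro j hj
    have hjq : j < q := List.mem_range.mp hj
    have hidx : (j + 1) * mn - 1 < d.length := by
      have h4 : (j + 1) * mn ≤ q * mn := Nat.mul_le_mul_right mn (by omega)
      have h6 : 1 ≤ (j + 1) * mn := le_trans (by omega) (Nat.le_mul_of_pos_left mn (by omega))
      exact lt_of_lt_of_le (Nat.sub_lt (by omega) Nat.one_pos) (le_trans h4 hqmn)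
    have hixeq : (1 + (j : Int)) * m - 1 = (((j + 1) * mn - 1 : Nat) : Int) := by
      have hmn1 : 1 ≤ mn := by omega
      have hpos : 1 ≤ j * mn + mn := le_trans hmn1 (Nat.le_add_left mn _)
      have hx : (j + 1) * mn - 1 = j * mn + mn - 1 := by
        have : (j + 1) * mn = j * mn + mn := by ring
        omega
      rw [← hmcast, hx, Nat.cast_sub hpos]
      push_cast; ring
    simp only [Function.comp_apply, hixeq, PySem.List.pyGet?_natCast]
    rw [List.getElem?_eq_getElem hidx, Option.getD_some,
        List.getD_eq_getElem d 0 hidx]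
  · -- score = [], m < 0 : both sides are 0
    subst hnil
    have hd : PySem.List.sorted ([] : List Int) (fun x => x) true = [] := by
      have := PySem.List.length_sorted ([] : List Int) (fun x => x) true
      exact List.eq_nil_of_length_eq_zero (by simpa using this)
    simp only [hd]
    rw [solutionLoop.eq_def]
    simp [PySem.Int.floordiv]
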